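-- pv_equiv track=rewrite | github.com/hectorcarrion/connect4 | Player.py | count_series
-- ===== SOURCE A (Python) =====
-- def count_series(line, player):
--     # Counts the size and number of connected components in a board
--     count = 0
--     connected_magnitudes = []
--
--     for disc in line:
--         if disc != player:
--             if count <= 1:
--                 count = 0
--             else:
--                 connected_magnitudes.append(count)
--                 count = 0
--         else:
--             count += 1
--     if count > 1:
--         connected_magnitudes.append(count)
--     return connected_magnitudes
-- ===== SOURCE B (Python) =====
-- def count_series(line, player):
--     # Two-stage: scan maximal runs of equal discs, keep player's runs of length > 1.
--     result = []
--     i, m = 0, len(line)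
--     while i < m:
--         j = i + 1
--         while j < m and line[j] == line[i]:
--             j += 1
--         if line[i] == player and j - i > 1:
--             result.append(j - i)
--         i = j
--     return result
-- ===== Notes on version B (the rewrite author's own statement) =====
-- stated objective: alternative
-- what changed: Replaces A's per-element counter/branch state machine with a run-segmentation scan: find each maximal run of equal discs, then keep its length when the run is the player's and longer than 1.
import Mathlib
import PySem

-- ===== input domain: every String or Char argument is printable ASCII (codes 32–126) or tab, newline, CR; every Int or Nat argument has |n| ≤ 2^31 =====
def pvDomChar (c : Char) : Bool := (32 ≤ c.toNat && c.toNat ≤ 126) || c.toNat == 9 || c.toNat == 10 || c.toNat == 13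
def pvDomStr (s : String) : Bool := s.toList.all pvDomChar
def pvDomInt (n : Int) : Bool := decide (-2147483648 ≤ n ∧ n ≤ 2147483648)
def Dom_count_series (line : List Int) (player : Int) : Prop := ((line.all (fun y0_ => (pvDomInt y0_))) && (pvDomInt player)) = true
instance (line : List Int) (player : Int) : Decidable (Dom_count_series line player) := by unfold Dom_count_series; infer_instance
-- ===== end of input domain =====

-- ===== PORT A =====
-- B segments the line into maximal runs instead of A's per-element counter state machine (alternative decomposition, same cost).
-- A-side helper: the loop body of A's for-loop (state = (count, connected_magnitudes)).
def stepA (player : Int) (st : Int × List Int) (disc : Int) : Int × List Int :=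
  if disc ≠ player then
    if st.1 ≤ 1 then (0, st.2) else (0, st.2 ++ [st.1])
  else (st.1 + 1, st.2)

def count_series (line : List Int) (player : Int) : List Int :=
  let r := line.foldl (stepA player) (0, [])
  if r.1 > 1 then r.2 ++ [r.1] else r.2

-- ===== PORT B =====
-- One recursive step = one iteration of B's outer while loop; the inner while loop
-- (advancing j over equal discs) is the length of the equal-prefix (takeWhile).
def count_series_alt (line : List Int) (player : Int) : List Int :=
  match line with
  | [] => []
  | v :: xs =>
    let n : Int := 1 + ((xs.takeWhile (fun x => x == v)).length : Int)
    let rest := count_series_alt (xs.dropWhile (fun x => x == v)) player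
    if v = player ∧ n > 1 then n :: rest else rest
termination_by line.length
decreasing_by
  simp only [List.length_cons]
  exact Nat.lt_succ_of_le (List.length_dropWhile_le _ _)

-- ===== PRECONDITION & SPEC =====
def Spec_count_series (line : List Int) (player : Int) (out : List Int) : Prop := out = count_series_alt line player
instance (line : List Int) (player : Int) (out : List Int) : Decidable (Spec_count_series line player out) := by unfold Spec_count_series; infer_instance

-- ===== CLAIM (what is proved, stated in full; the proofs are below) =====
def Claim_equal_count_series : Prop := ∀ (line : List Int) (player : Int), Dom_count_series line player → Spec_count_series line player (count_series line player)

-- ===== LEMMAS AND PROOFS =====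
-- emit player c rest = what A's loop will still output given pending run count c.
def emit (player : Int) : Int → List Int → List Int
  | c, [] => if c > 1 then [c] else []
  | c, d :: xs => if d ≠ player then (if c ≤ 1 then emit player 0 xs else c :: emit player 0 xs) else emit player (c + 1) xs

theorem foldA_emit (player : Int) (line : List Int) : ∀ (c : Int) (mags : List Int),
    (if (line.foldl (stepA player) (c, mags)).1 > 1
     then (line.foldl (stepA player) (c, mags)).2 ++ [(line.foldl (stepA player) (c, mags)).1]
     else (line.foldl (stepA player) (c, mags)).2) = mags ++ emit player c line := by
  induction line with
  | nil =>
    intro c mags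
    simp only [List.foldl_nil, emit]
    split_ifs <;> simp
  | cons d xs ih =>
    intro c mags
    simp only [List.foldl_cons, stepA, emit]
    by_cases h1 : d ≠ player
    · rw [if_pos h1, if_pos h1]
      by_cases h2 : c ≤ 1
      · rw [if_pos h2, if_pos h2]
        exact ih 0 mags
      · rw [if_neg h2, if_neg h2, ih 0 (mags ++ [c])]
        simp
    · rw [if_neg h1, if_neg h1]
      exact ih (c + 1) mags

theorem emit_run (player : Int) (r : List Int) : ∀ (t : List Int), (∀ x ∈ t, x = player) →
    ∀ c : Int, emit player c (t ++ r) = emit player (c + (t.length : Int)) r := by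
  intro t
  induction t with
  | nil => intro _ c; simp
  | cons a t ih =>
    intro h c
    have ha : a = player := h a (by simp)
    simp only [List.cons_append, emit, ha, ne_eq, not_true_eq_false, if_false]
    rw [ih (fun x hx => h x (List.mem_cons_of_mem _ hx)) (c + 1)]
    congr 1
    simp only [List.length_cons]
    push_cast
    ring

theorem emit_skip (player : Int) (r : List Int) : ∀ (t : List Int), (∀ x ∈ t, x ≠ player) →
    emit player 0 (t ++ r) = emit player 0 r := by
  intro t
  induction t with
  | nil => intro _; simp
  | cons a t ih =>
    intro h
    have ha : a ≠ player := h a (by simp)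
    simp only [List.cons_append, emit, ne_eq, ha, not_false_eq_true, if_true]
    rw [if_pos (by omega : (0:Int) ≤ 1)]
    exact ih (fun x hx => h x (List.mem_cons_of_mem _ hx))

theorem alt_eq_emit (player : Int) : ∀ (N : Nat) (line : List Int), line.length ≤ N →
    count_series_alt line player = emit player 0 line := by
  intro N
  induction N with
  | zero =>
    intro line hlen
    have : line = [] := List.eq_nil_of_length_eq_zero (Nat.le_zero.mp hlen)
    subst this
    simp [count_series_alt, emit]
  | succ N ih =>
    intro line hlen
    cases line with
    | nil => simp [count_series_alt, emit]
    | cons v xs =>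
      have hsplit : xs.takeWhile (fun x => x == v) ++ xs.dropWhile (fun x => x == v) = xs :=
        List.takeWhile_append_dropWhile
      have hlenr : (xs.dropWhile (fun x => x == v)).length ≤ N := by
        have := List.length_dropWhile_le (fun x => x == v) xs
        simp only [List.length_cons] at hlen
        omega
      have hir : count_series_alt (xs.dropWhile (fun x => x == v)) player
          = emit player 0 (xs.dropWhile (fun x => x == v)) := ih _ hlenr
      have htv : ∀ x ∈ xs.takeWhile (fun x => x == v), x = v := by
        intro x hx
        simpa using List.mem_takeWhile_imp hx
      have hB : count_series_alt (v :: xs) player =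
          (if v = player ∧ (1 + ((xs.takeWhile (fun x => x == v)).length : Int)) > 1
           then (1 + ((xs.takeWhile (fun x => x == v)).length : Int)) :: count_series_alt (xs.dropWhile (fun x => x == v)) player
           else count_series_alt (xs.dropWhile (fun x => x == v)) player) := by
        rw [count_series_alt]
      rw [hB, hir]
      by_cases hv : v = player
      · subst hv
        have e1 : emit v 0 (v :: xs) = emit v (1 + ((xs.takeWhile (fun x => x == v)).length : Int)) (xs.dropWhile (fun x => x == v)) := by
          simp only [emit, ne_eq, not_true_eq_false, if_false]
          conv_lhs => rw [← hsplit]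
          rw [emit_run v _ _ htv (0 + 1)]
          norm_num
        rw [e1]
        cases hr : xs.dropWhile (fun x => x == v) with
        | nil =>
          have hnil : emit v 0 ([] : List Int) = [] := by simp [emit]
          rw [hnil]
          simp only [emit, true_and]
        | cons d r' =>
          have hd : d ≠ v := by
            have h0 := List.head?_dropWhile_not (p := fun x => x == v) (l := xs)
            rw [hr] at h0
            simp at h0
            intro hdv
            rw [hdv] at h0
            simp at h0
          have hd0 : emit v 0 (d :: r') = emit v 0 r' := by
            simp only [emit, ne_eq, hd, not_false_eq_true, if_true]
            rw [if_pos (by omega : (0:Int) ≤ 1)]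
          have hR : emit v (1 + ((xs.takeWhile (fun x => x == v)).length : Int)) (d :: r')
              = if (1 + ((xs.takeWhile (fun x => x == v)).length : Int)) ≤ 1
                then emit v 0 r' else (1 + ((xs.takeWhile (fun x => x == v)).length : Int)) :: emit v 0 r' := by
            simp [emit, hd]
          rw [hd0, hR]
          simp only [true_and]
          split_ifs with h1 h2 <;> first | rfl | omega
      · have e2 : emit player 0 (v :: xs) = emit player 0 (xs.dropWhile (fun x => x == v)) := by
          simp only [emit, ne_eq, hv, not_false_eq_true, if_true]
          rw [if_pos (by omega : (0:Int) ≤ 1)]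
          conv_lhs => rw [← hsplit]
          exact emit_skip player _ _ (fun x hx => by rw [htv x hx]; exact hv)
        rw [e2]
        rw [if_neg (by simp [hv])]

-- ===== VERDICT (by name: the statement is the Claim_ definition above) =====
theorem count_series_spec : Claim_equal_count_series := by
  intro line player _
  unfold Spec_count_series count_series
  rw [alt_eq_emit player line.length line le_rfl]
  simpa using foldA_emit player line 0 []
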